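-- pv_equiv track=rewrite | github.com/jominjin92-a11y/create-system | build_generation_excel_split_layers.py | _merge_none_cells
-- ===== SOURCE A (Python) =====
-- from typing import Any, Dict, List, Optional, Tuple
--
-- def _merge_none_cells(rows: List[List]) -> List[List]:
--     """
--     [FIX 표-2] 병합 셀(None) 처리 — 중복 행 방지
--     왼쪽→위쪽 순으로 채우되, 완전 동일한 연속 행은 제거
--     """
--     if not rows:
--         return rows
--     filled = [list(row) for row in rows]
--     num_cols = max(len(r) for r in filled)
--
--     for row in filled:
--         while len(row) < num_cols:
--             row.append('')
--
--     # 왼쪽으로 채우기 (colspan)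
--     for r_idx, row in enumerate(filled):
--         for c_idx in range(1, len(row)):
--             if row[c_idx] is None:
--                 row[c_idx] = row[c_idx - 1] if row[c_idx - 1] is not None else ''
--
--     # 위쪽으로 채우기 (rowspan)
--     for c_idx in range(num_cols):
--         for r_idx in range(1, len(filled)):
--             if c_idx < len(filled[r_idx]) and (filled[r_idx][c_idx] is None or filled[r_idx][c_idx] == ''):
--                 if c_idx < len(filled[r_idx - 1]):
--                     filled[r_idx][c_idx] = filled[r_idx - 1][c_idx]
--
--     # [FIX] 완전히 동일한 연속 행 제거 (중복 방지)
--     deduped = []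
--     for row in filled:
--         if not deduped or row != deduped[-1]:
--             deduped.append(row)
--     return deduped
-- ===== SOURCE B (Python) =====
-- # B: closed-form per-cell computation — each output cell is looked up directly by
-- # scanning left for the nearest non-None original cell and then up for the first
-- # non-empty left-filled value, instead of A's stateful pad/left-fill/up-fill passes
-- # over a mutable matrix; dedupe via zip with the shifted list (objective: alternative).
-- from typing import List
--
-- def _merge_none_cells(rows: List[List]) -> List[List]:
--     n = max((len(r) for r in rows), default=0)
--
--     def orig(r, c):
--         row = rows[r]
--         return row[c] if c < len(row) else ''
--
--     def left(r, c):
--         v = orig(r, c)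
--         if v is not None:
--             return v
--         if c == 0:
--             return None
--         for j in range(c - 1, -1, -1):
--             if orig(r, j) is not None:
--                 return orig(r, j)
--         return ''
--
--     def cell(r, c):
--         for rp in range(r, 0, -1):
--             v = left(rp, c)
--             if v is not None and v != '':
--                 return v
--         return left(0, c)
--
--     filled = [[cell(r, c) for c in range(n)] for r in range(len(rows))]
--     return [row for prev, row in zip([None] + filled, filled) if row != prev]
-- ===== Notes on version B (the rewrite author's own statement) =====
-- stated objective: alternative
-- what changed: Replaces A's staged in-place passes over a mutable matrix (pad, row-major left-fill, column-major up-fill, dedupe) with a closed-form per-cell lookup: each output cell scans left for the nearest non-None original cell and then up for the first non-blank left-filled value, and consecutive-duplicate rows are dropped by zipping the filled matrix with its shifted self.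
import Mathlib
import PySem

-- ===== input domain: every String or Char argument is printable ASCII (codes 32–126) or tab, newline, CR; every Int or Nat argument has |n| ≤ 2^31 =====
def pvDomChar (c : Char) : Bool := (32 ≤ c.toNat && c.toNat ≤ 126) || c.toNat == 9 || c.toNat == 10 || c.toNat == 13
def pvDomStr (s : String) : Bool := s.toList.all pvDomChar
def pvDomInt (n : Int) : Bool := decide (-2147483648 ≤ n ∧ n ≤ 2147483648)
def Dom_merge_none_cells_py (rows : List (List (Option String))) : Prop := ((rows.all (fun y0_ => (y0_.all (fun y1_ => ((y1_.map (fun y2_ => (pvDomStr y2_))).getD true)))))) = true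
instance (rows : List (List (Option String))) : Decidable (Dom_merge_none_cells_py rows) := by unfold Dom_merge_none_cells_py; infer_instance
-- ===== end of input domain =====

-- B computes every output cell by a closed-form lookup (scan left for the nearest
-- non-None original cell, then up for the first non-blank left-filled value) and
-- dedupes by zipping with the shifted list, instead of A's stateful pad/left-fill/
-- up-fill passes over a mutable matrix (objective: alternative).

-- ===== PORT A =====

-- while len(row) < num_cols: row.append('')
def padA (n : Nat) (row : List (Option String)) : List (Option String) :=
  if _h : row.length < n then padA n (row ++ [some ""]) else row
termination_by n - row.length
decreasing_by simp; omega

-- inner left-fill loop: row[c] = row[c-1] if row[c-1] is not None else '' (c ≥ 1)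
def lfGoA (prev : Option String) (xs : List (Option String)) : List (Option String) :=
  match xs with
  | [] => []
  | y :: ys =>
      let y' := if y = none then (if prev = none then some "" else prev) else y
      y' :: lfGoA y' ys

def lfA (row : List (Option String)) : List (Option String) :=
  match row with
  | [] => []
  | x :: xs => x :: lfGoA x xs

-- body of the up-fill assignment for one cell, with A's bounds guards
def updAtA (c : Nat) (prev y : List (Option String)) : List (Option String) :=
  if c < y.length ∧ (y.getD c none = none ∨ y.getD c none = some "") then
    (if c < prev.length then y.set c (prev.getD c none) else y)
  else y

-- inner up-fill loop for a fixed column c: r from 1, filled[r][c] ← filled[r-1][c]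
def upColGoA (c : Nat) (prev : List (Option String)) (xs : List (List (Option String))) :
    List (List (Option String)) :=
  match xs with
  | [] => []
  | y :: ys =>
      let y' := updAtA c prev y
      y' :: upColGoA c y' ys

def upColA (c : Nat) (m : List (List (Option String))) : List (List (Option String)) :=
  match m with
  | [] => []
  | x :: xs => x :: upColGoA c x xs

def merge_none_cells_py (rows : List (List (Option String))) : List (List (Option String)) :=
  if rows = [] then rows else
    let n := (rows.map List.length).foldl Nat.max 0
    let padded := rows.map (padA n)
    let lf := padded.map lfA
    let uf := (List.range n).foldl (fun m c => upColA c m) lf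
    uf.foldl (fun acc row => if acc = [] ∨ acc.getLast? ≠ some row then acc ++ [row] else acc) []

-- ===== PORT B =====

-- def orig(r, c): row[c] if c < len(row) else ''
def origB (rows : List (List (Option String))) (r c : Nat) : Option String :=
  let row := rows.getD r []
  if c < row.length then row.getD c none else some ""

-- for j in range(c-1, -1, -1): if orig(r,j) is not None: return orig(r,j); else ''
def leftScanB (rows : List (List (Option String))) (r : Nat) : Nat → Option String
  | 0 => if origB rows r 0 ≠ none then origB rows r 0 else some ""
  | j + 1 => if origB rows r (j + 1) ≠ none then origB rows r (j + 1) else leftScanB rows r j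

def leftB (rows : List (List (Option String))) (r c : Nat) : Option String :=
  let v := origB rows r c
  if v ≠ none then v
  else if c = 0 then none
  else leftScanB rows r (c - 1)

-- for rp in range(r, 0, -1): if left(rp,c) not in {None,''}: return it; else left(0,c)
def cellB (rows : List (List (Option String))) (c : Nat) : Nat → Option String
  | 0 => leftB rows 0 c
  | r + 1 =>
      let v := leftB rows (r + 1) c
      if v ≠ none ∧ v ≠ some "" then v else cellB rows c r

def merge_none_cells_py_alt (rows : List (List (Option String))) : List (List (Option String)) :=
  let n := (rows.map List.length).foldl Nat.max 0
  let filled := (List.range rows.length).map (fun r => (List.range n).map (fun c => cellB rows c r))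
  -- [row for prev, row in zip([None] + filled, filled) if row != prev]
  (List.zip ((none : Option (List (Option String))) :: filled.map some) filled).filterMap
    (fun p => if some p.2 ≠ p.1 then some p.2 else none)

-- ===== PRECONDITION & SPEC =====
def Spec_merge_none_cells_py (rows : List (List (Option String))) (out : List (List (Option String))) : Prop := out = merge_none_cells_py_alt rows
instance (rows : List (List (Option String))) (out : List (List (Option String))) : Decidable (Spec_merge_none_cells_py rows out) := by unfold Spec_merge_none_cells_py; infer_instance

-- ===== CLAIM (what is proved, stated in full; the proofs are below) =====
def Claim_equal_merge_none_cells_py : Prop := ∀ (rows : List (List (Option String))), Dom_merge_none_cells_py rows → Spec_merge_none_cells_py rows (merge_none_cells_py rows)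

-- ===== LEMMAS AND PROOFS =====

-- proof-side abstractions of A's passes
def updAll (cs : List Nat) (prev y : List (Option String)) : List (Option String) :=
  cs.foldl (fun y c => updAtA c prev y) y

def pgoA (cs : List Nat) (prev : List (Option String)) (xs : List (List (Option String))) :
    List (List (Option String)) :=
  match xs with
  | [] => []
  | y :: ys =>
      let y' := updAll cs prev y
      y' :: pgoA cs y' ys

-- up-fill of a whole row from the previous finalised row
def upRowB (prev row : List (Option String)) : List (Option String) :=
  List.zipWith (fun p x => if x = none ∨ x = some "" then p else x) prev row

def rgoB (prev : List (Option String)) (xs : List (List (Option String))) :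
    List (List (Option String)) :=
  match xs with
  | [] => []
  | y :: ys =>
      let y' := upRowB prev y
      y' :: rgoB y' ys

-- one step of A's left-fill
def stepL (prev x : Option String) : Option String :=
  if x = none then (if prev = none then some "" else prev) else x

-- final (up-filled) rows, top-down
def finalRows (rows : List (List (Option String))) (n : Nat) : Nat → List (Option String)
  | 0 => lfA (padA n (rows.getD 0 []))
  | i + 1 => upRowB (finalRows rows n i) (lfA (padA n (rows.getD (i + 1) [])))

-- collapse of consecutive duplicates, threading the previous row
def cgo (p : List (Option String)) : List (List (Option String)) → List (List (Option String))
  | [] => []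
  | x :: xs => if x = p then cgo x xs else x :: cgo x xs

theorem cellB_succ (rows : List (List (Option String))) (c r : Nat) :
    cellB rows c (r + 1)
      = if (leftB rows (r + 1) c ≠ none ∧ leftB rows (r + 1) c ≠ some "") then
          leftB rows (r + 1) c else cellB rows c r := rfl

theorem lfGoA_length (prev : Option String) (xs : List (Option String)) :
    (lfGoA prev xs).length = xs.length := by
  induction xs generalizing prev with
  | nil => rfl
  | cons y ys ih => simp [lfGoA, ih]

theorem lfA_length (row : List (Option String)) : (lfA row).length = row.length := by
  cases row with
  | nil => rfl
  | cons x xs => simp [lfA, lfGoA_length]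

theorem padA_eq (n : Nat) (row : List (Option String)) :
    padA n row = row ++ List.replicate (n - row.length) (some "") := by
  fun_induction padA n row with
  | case1 r hlt ih =>
      rw [ih]
      have h1 : n - r.length = (n - (r ++ [some ""]).length) + 1 := by
        simp; omega
      rw [h1, List.replicate_succ, List.append_assoc]
      rfl
  | case2 r hlt =>
      have h0 : n - r.length = 0 := by omega
      simp [h0]

theorem updAtA_length (c : Nat) (prev y : List (Option String)) :
    (updAtA c prev y).length = y.length := by
  unfold updAtA; split_ifs <;> simp

theorem updAll_length (cs : List Nat) (prev y : List (Option String)) :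
    (updAll cs prev y).length = y.length := by
  induction cs generalizing y with
  | nil => rfl
  | cons c cs ih => simp only [updAll, List.foldl_cons] at *; rw [ih, updAtA_length]

theorem updAtA_getElem?_ne (c i : Nat) (prev y : List (Option String)) (h : i ≠ c) :
    (updAtA c prev y)[i]? = y[i]? := by
  unfold updAtA; split_ifs <;> simp [List.getElem?_set_ne (Ne.symm h)]

theorem updAll_getElem?_not_mem (cs : List Nat) (i : Nat) (prev : List (Option String)) :
    ∀ (y : List (Option String)), i ∉ cs → (updAll cs prev y)[i]? = y[i]? := by
  induction cs with
  | nil => intro y _; rfl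
  | cons c cs ih =>
      intro y h
      simp only [updAll, List.foldl_cons] at *
      rw [ih _ (fun hm => h (List.mem_cons_of_mem _ hm)),
        updAtA_getElem?_ne _ _ _ _ (fun he => h (List.mem_cons.mpr (Or.inl he)))]

theorem updAtA_getD_ne (c i : Nat) (prev y : List (Option String)) (h : i ≠ c) :
    (updAtA c prev y).getD i none = y.getD i none := by
  rw [List.getD_eq_getElem?_getD, List.getD_eq_getElem?_getD, updAtA_getElem?_ne _ _ _ _ h]

theorem updAll_getD_not_mem (cs : List Nat) (i : Nat) (prev y : List (Option String))
    (h : i ∉ cs) : (updAll cs prev y).getD i none = y.getD i none := by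
  rw [List.getD_eq_getElem?_getD, List.getD_eq_getElem?_getD, updAll_getElem?_not_mem _ _ _ _ h]

theorem updAtA_congr (c : Nat) (p q y : List (Option String)) (hl : p.length = q.length)
    (hg : p.getD c none = q.getD c none) : updAtA c p y = updAtA c q y := by
  unfold updAtA; rw [hl, hg]

theorem L2' (c : Nat) (cs : List Nat) (hc : c ∉ cs) :
    ∀ (xs : List (List (Option String))) (p q : List (Option String)),
      p.length = q.length → p.getD c none = q.getD c none →
      pgoA cs q (upColGoA c p xs) = pgoA (c :: cs) q xs := by
  intro xs
  induction xs with
  | nil => intro p q _ _; rfl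
  | cons y ys ih =>
      intro p q hl hg
      have hq : updAtA c p y = updAtA c q y := updAtA_congr c p q y hl hg
      simp only [upColGoA, pgoA]
      have hall : updAll (c :: cs) q y = updAll cs q (updAtA c q y) := rfl
      rw [hall, ← hq]
      rw [ih (updAtA c p y) (updAll cs q (updAtA c p y))
          (by rw [updAll_length]) (by rw [updAll_getD_not_mem _ _ _ _ hc])]

theorem pgoA_nil (prev : List (Option String)) (xs : List (List (Option String))) :
    pgoA [] prev xs = xs := by
  induction xs generalizing prev with
  | nil => rfl
  | cons y ys ih => simp only [pgoA, updAll, List.foldl_nil]; rw [ih]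

theorem L1 (cs : List Nat) (h : cs.Nodup) :
    ∀ (m : List (List (Option String))),
    cs.foldl (fun m c => upColA c m) m =
      (match m with | [] => [] | x :: xs => x :: pgoA cs x xs) := by
  induction cs with
  | nil =>
      intro m; cases m with
      | nil => rfl
      | cons x xs => simp [pgoA_nil]
  | cons c cs ih =>
      intro m
      have hnd := List.nodup_cons.mp h
      rw [List.foldl_cons, ih hnd.2]
      cases m with
      | nil => rfl
      | cons x xs =>
          simp only [upColA]
          rw [L2' c cs hnd.1 xs x x rfl rfl]

theorem updAtA_self (i : Nat) (p y : List (Option String)) (hy : i < y.length)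
    (hp : i < p.length) :
    (updAtA i p y)[i]? = some (if (y.getD i none = none ∨ y.getD i none = some "") then
      p.getD i none else y.getD i none) := by
  unfold updAtA
  by_cases hb : (y.getD i none = none ∨ y.getD i none = some "")
  · rw [if_pos ⟨hy, hb⟩, if_pos hp, if_pos hb, List.getElem?_set_self (by simpa using hy)]
  · rw [if_neg (fun hc => hb hc.2), if_neg hb, List.getElem?_eq_getElem hy,
      List.getD_eq_getElem _ _ hy]

theorem A3' (i : Nat) (p : List (Option String)) (hip : i < p.length) :
    ∀ (cs : List Nat), cs.Nodup → i ∈ cs →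
    ∀ (y : List (Option String)), i < y.length →
    (updAll cs p y)[i]? = some (if (y.getD i none = none ∨ y.getD i none = some "") then
      p.getD i none else y.getD i none) := by
  intro cs
  induction cs with
  | nil => intro _ hm; exact absurd hm (List.not_mem_nil)
  | cons c cs ih =>
      intro hnd hm y hy
      have hnd' := List.nodup_cons.mp hnd
      simp only [updAll, List.foldl_cons]
      by_cases hic : i = c
      · subst hic
        rw [show List.foldl (fun y c => updAtA c p y) (updAtA i p y) cs
            = updAll cs p (updAtA i p y) from rfl,
          updAll_getElem?_not_mem _ _ _ _ hnd'.1, updAtA_self i p y hy hip]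
      · have hm' : i ∈ cs := by cases List.mem_cons.mp hm with
          | inl h => exact absurd h hic
          | inr h => exact h
        rw [show List.foldl (fun y c => updAtA c p y) (updAtA c p y) cs
            = updAll cs p (updAtA c p y) from rfl,
          ih hnd'.2 hm' (updAtA c p y) (by rw [updAtA_length]; exact hy),
          updAtA_getD_ne c i p y hic]

theorem L3 (n : Nat) (p y : List (Option String)) (hp : p.length = n) (hy : y.length = n) :
    updAll (List.range n) p y = upRowB p y := by
  apply List.ext_getElem?
  intro i
  by_cases hi : i < n
  · rw [A3' i p (hp ▸ hi) (List.range n) List.nodup_range (List.mem_range.mpr hi) y (hy ▸ hi)]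
    rw [upRowB, List.getElem?_zipWith, List.getElem?_eq_getElem (hp ▸ hi),
      List.getElem?_eq_getElem (hy ▸ hi)]
    rw [List.getD_eq_getElem _ _ (hy ▸ hi), List.getD_eq_getElem _ _ (hp ▸ hi)]
  · rw [List.getElem?_eq_none (by rw [updAll_length]; omega),
      List.getElem?_eq_none (by rw [upRowB, List.length_zipWith]; omega)]

theorem upRowB_length (p y : List (Option String)) :
    (upRowB p y).length = min p.length y.length := by
  simp [upRowB]

theorem pgo_range (n : Nat) :
    ∀ (xs : List (List (Option String))) (prev : List (Option String)),
      prev.length = n → (∀ y ∈ xs, y.length = n) →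
      pgoA (List.range n) prev xs = rgoB prev xs := by
  intro xs
  induction xs with
  | nil => intro prev _ _; rfl
  | cons y ys ih =>
      intro prev hp hx
      have hy : y.length = n := hx y (List.mem_cons_self ..)
      simp only [pgoA, rgoB]
      rw [L3 n prev y hp hy, ih (upRowB prev y) (by rw [upRowB_length, hp, hy]; omega)
        (fun z hz => hx z (List.mem_cons_of_mem _ hz))]

theorem foldl_max_init (l : List Nat) : ∀ (a : Nat), a ≤ l.foldl Nat.max a := by
  induction l with
  | nil => intro a; exact le_refl _
  | cons b l ih =>
      intro a
      simp only [List.foldl_cons]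
      exact le_trans (Nat.le_max_left a b) (ih _)

theorem foldl_max_le (l : List Nat) : ∀ (a x : Nat), x ∈ l → x ≤ l.foldl Nat.max a := by
  induction l with
  | nil => intro _ _ h; exact absurd h (List.not_mem_nil)
  | cons b l ih =>
      intro a x h
      simp only [List.foldl_cons]
      cases List.mem_cons.mp h with
      | inl h => subst h; exact le_trans (Nat.le_max_right a x) (foldl_max_init l _)
      | inr h => exact ih _ _ h

theorem padA_length (n : Nat) (t : List (Option String)) (h : t.length ≤ n) :
    (padA n t).length = n := by
  rw [padA_eq]; simp; omega

theorem lfpad_length (n : Nat) (row : List (Option String)) (h : row.length ≤ n) :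
    (lfA (padA n row)).length = n := by
  rw [lfA_length, padA_eq]; simp; omega

-- ===== left-fill characterisation =====

theorem stepL_ne_none (p : Option String) : stepL p none ≠ none := by
  unfold stepL
  by_cases hp : p = none <;> simp [hp]

theorem lfGoA_getD (xs : List (Option String)) : ∀ (prev : Option String) (i : Nat),
    i < xs.length →
    (lfGoA prev xs).getD i none = stepL ((xs.take i).foldl stepL prev) (xs.getD i none) := by
  induction xs with
  | nil => intro prev i h; simp at h
  | cons y ys ih =>
      intro prev i h
      cases i with
      | zero => simp [lfGoA, stepL]
      | succ i =>
          have : (lfGoA prev (y :: ys)).getD (i + 1) none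
              = (lfGoA (stepL prev y) ys).getD i none := by
            simp [lfGoA, stepL]
          rw [this, ih (stepL prev y) i (by simpa using h)]
          simp

theorem lfA_getD0 (l : List (Option String)) : (lfA l).getD 0 none = l.getD 0 none := by
  cases l with
  | nil => rfl
  | cons x xs => rfl

theorem lfA_getD_succ (l : List (Option String)) (c : Nat) (h : c + 1 < l.length) :
    (lfA l).getD (c + 1) none
      = stepL (((l.drop 1).take c).foldl stepL (l.getD 0 none)) (l.getD (c + 1) none) := by
  cases l with
  | nil => simp at h
  | cons x xs =>
      have : (lfA (x :: xs)).getD (c + 1) none = (lfGoA x xs).getD c none := by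
        simp [lfA]
      rw [this, lfGoA_getD xs x c (by simpa using h)]
      simp

-- padded row entries = origB
theorem origB_padded (rows : List (List (Option String))) (n : Nat) (i c : Nat) (hc : c < n)
    (hle : (rows.getD i []).length ≤ n) :
    (padA n (rows.getD i [])).getD c none = origB rows i c := by
  rw [padA_eq]
  unfold origB
  by_cases h : c < (rows.getD i []).length
  · rw [if_pos h, List.getD_eq_getElem?_getD, List.getElem?_append_left h,
      ← List.getD_eq_getElem?_getD]
  · rw [if_neg h, List.getD_eq_getElem?_getD, List.getElem?_append_right (by omega)]
    rw [List.getElem?_replicate]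
    simp only [Option.getD]
    rw [if_pos (by omega)]

theorem leftScanB_zero (rows : List (List (Option String))) (r : Nat) :
    leftScanB rows r 0 = if origB rows r 0 ≠ none then origB rows r 0 else some "" := rfl

theorem leftScanB_succ (rows : List (List (Option String))) (r j : Nat) :
    leftScanB rows r (j + 1)
      = if origB rows r (j + 1) ≠ none then origB rows r (j + 1) else leftScanB rows r j := rfl

theorem carryL (rows : List (List (Option String))) (n : Nat) (i : Nat)
    (hle : (rows.getD i []).length ≤ n) : ∀ (k : Nat), k + 1 ≤ n →
    stepL ((((padA n (rows.getD i [])).drop 1).take k).foldl stepL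
        ((padA n (rows.getD i [])).getD 0 none)) none
      = leftScanB rows i k := by
  intro k
  induction k with
  | zero =>
      intro hk
      rw [List.take_zero, List.foldl_nil]
      rw [origB_padded rows n i 0 (by omega) hle, leftScanB_zero]
      unfold stepL
      by_cases h0 : origB rows i 0 = none <;> simp [h0]
  | succ k ih =>
      intro hk
      have hlen : (padA n (rows.getD i [])).length = n := padA_length n _ hle
      have hk' : k < ((padA n (rows.getD i [])).drop 1).length := by
        rw [List.length_drop, hlen]
        omega
      rw [List.take_succ, List.getElem?_eq_getElem hk', Option.toList_some, List.foldl_append,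
        List.foldl_cons, List.foldl_nil]
      have hget : ((padA n (rows.getD i [])).drop 1)[k] = origB rows i (k + 1) := by
        rw [List.getElem_drop]
        have h1k : 1 + k = k + 1 := Nat.add_comm 1 k
        simp only [h1k]
        rw [← List.getD_eq_getElem _ none (by rw [hlen]; omega)]
        exact origB_padded rows n i (k + 1) (by omega) hle
      rw [hget, leftScanB_succ]
      by_cases hv : origB rows i (k + 1) = none
      · rw [hv]
        have h1 : stepL (stepL ((((padA n (rows.getD i [])).drop 1).take k).foldl stepL
            ((padA n (rows.getD i [])).getD 0 none)) none) none
            = stepL ((((padA n (rows.getD i [])).drop 1).take k).foldl stepL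
            ((padA n (rows.getD i [])).getD 0 none)) none := by
          generalize hX : stepL ((((padA n (rows.getD i [])).drop 1).take k).foldl stepL
            ((padA n (rows.getD i [])).getD 0 none)) none = X
          have hXn : X ≠ none := hX ▸ stepL_ne_none _
          unfold stepL
          simp [hXn]
        rw [h1, ih (by omega), if_neg (by simp [hv])]
      · have h2 : stepL ((((padA n (rows.getD i [])).drop 1).take k).foldl stepL
            ((padA n (rows.getD i [])).getD 0 none)) (origB rows i (k + 1))
            = origB rows i (k + 1) := by
          unfold stepL; simp [hv]
        have h3 : stepL (origB rows i (k + 1)) none = origB rows i (k + 1) := by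
          unfold stepL; simp [hv]
        rw [h2, h3, if_pos (by simp [hv])]

-- left-filled padded row = row-wise closed form
theorem LF (rows : List (List (Option String))) (n : Nat) (i : Nat)
    (hle : (rows.getD i []).length ≤ n) :
    lfA (padA n (rows.getD i [])) = (List.range n).map (fun c => leftB rows i c) := by
  have hlen : (padA n (rows.getD i [])).length = n := padA_length n _ hle
  apply List.ext_getElem
  · rw [lfA_length, hlen, List.length_map, List.length_range]
  · intro c h1 h2
    have hc : c < n := by simpa using h2
    rw [List.getElem_map, List.getElem_range]
    rw [← List.getD_eq_getElem _ none h1]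
    cases c with
    | zero =>
        rw [lfA_getD0, origB_padded rows n i 0 hc hle]
        unfold leftB
        by_cases hv : origB rows i 0 = none <;> simp [hv]
    | succ k =>
        rw [lfA_getD_succ _ k (by rw [hlen]; omega)]
        rw [origB_padded rows n i (k + 1) hc hle]
        unfold leftB
        by_cases hv : origB rows i (k + 1) = none
        · rw [hv]
          simp only [ne_eq, not_true_eq_false, if_false, Nat.add_eq_zero, and_false,
            if_false]
          have : stepL ((((padA n (rows.getD i [])).drop 1).take k).foldl stepL
              ((padA n (rows.getD i [])).getD 0 none)) none = leftScanB rows i k :=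
            carryL rows n i hle k (by omega)
          simpa using this
        · have : stepL ((((padA n (rows.getD i [])).drop 1).take k).foldl stepL
              ((padA n (rows.getD i [])).getD 0 none)) (origB rows i (k + 1))
              = origB rows i (k + 1) := by
            unfold stepL; simp [hv]
          rw [this]
          simp [hv]

-- final rows = per-cell closed form
theorem finalRows_eq (rows : List (List (Option String))) (n : Nat)
    (hle : ∀ t ∈ rows, t.length ≤ n) : ∀ (i : Nat),
    finalRows rows n i = (List.range n).map (fun c => cellB rows c i) := by
  have hle' : ∀ j, (rows.getD j []).length ≤ n := by
    intro j
    by_cases hj : j < rows.length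
    · rw [List.getD_eq_getElem rows [] hj]
      exact hle _ (List.getElem_mem hj)
    · rw [List.getD_eq_default _ _ (by omega)]
      simp
  intro i
  induction i with
  | zero =>
      unfold finalRows
      rw [LF rows n 0 (hle' 0)]
      apply List.map_congr_left
      intro c _
      rfl
  | succ i ih =>
      unfold finalRows
      rw [ih, LF rows n (i + 1) (hle' (i + 1))]
      rw [upRowB, List.zipWith_map, List.zipWith_self]
      apply List.map_congr_left
      intro c _
      show (if leftB rows (i + 1) c = none ∨ leftB rows (i + 1) c = some "" then
          cellB rows c i else leftB rows (i + 1) c) = cellB rows c (i + 1)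
      rw [cellB_succ]
      by_cases hv : leftB rows (i + 1) c = none ∨ leftB rows (i + 1) c = some ""
      · rw [if_pos hv, if_neg (by tauto)]
      · rw [if_neg hv, if_pos (by tauto)]

-- threading the up-fill over the tail = finalRows over indices
theorem RG (rows : List (List (Option String))) (n : Nat) :
    ∀ (ys : List (List (Option String))) (i : Nat), ys = rows.drop (i + 1) →
    rgoB (finalRows rows n i) (ys.map (fun t => lfA (padA n t)))
      = (List.range' (i + 1) ys.length).map (finalRows rows n) := by
  intro ys
  induction ys with
  | nil => intro i _; rfl
  | cons y ys ih =>
      intro i hy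
      have hyg : rows.getD (i + 1) [] = y := by
        have h0 : rows[i + 1]? = (rows.drop (i + 1))[0]? := by
          rw [List.getElem?_drop]
        rw [List.getD_eq_getElem?_getD, h0, ← hy]
        rfl
      have hys : ys = rows.drop (i + 2) := by
        have : rows.drop (i + 2) = (rows.drop (i + 1)).drop 1 := by
          rw [List.drop_drop]
        rw [this, ← hy]
        rfl
      have hstep : upRowB (finalRows rows n i) (lfA (padA n y)) = finalRows rows n (i + 1) := by
        rw [← hyg]
        rfl
      simp only [List.map_cons, rgoB, List.length_cons, List.range'_succ, List.map_cons]
      rw [hstep, ih (i + 1) hys]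

-- ===== dedupe characterisation =====

theorem dedupA_fold : ∀ (xs : List (List (Option String)))
    (acc : List (List (Option String))) (p : List (Option String)),
    acc ≠ [] → acc.getLast? = some p →
    xs.foldl (fun acc row => if acc = [] ∨ acc.getLast? ≠ some row then acc ++ [row] else acc) acc
      = acc ++ cgo p xs := by
  intro xs
  induction xs with
  | nil => intro acc p _ _; simp [cgo]
  | cons x xs ih =>
      intro acc p hne hlast
      rw [List.foldl_cons]
      by_cases hxp : x = p
      · subst hxp
        rw [if_neg (by simp [hne, hlast])]
        rw [ih acc x hne hlast]
        simp [cgo]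
      · rw [if_pos (Or.inr (by rw [hlast]; simp [Ne.symm]; exact fun h => hxp h.symm))]
        rw [ih (acc ++ [x]) x (by simp) (by simp)]
        simp [cgo, hxp]

theorem dedupB_zip : ∀ (xs : List (List (Option String))) (p : List (Option String)),
    (List.zip ((some p : Option (List (Option String))) :: xs.map some) xs).filterMap
        (fun q => if some q.2 ≠ q.1 then some q.2 else none)
      = cgo p xs := by
  intro xs
  induction xs with
  | nil => intro p; rfl
  | cons x xs ih =>
      intro p
      simp only [List.map_cons, List.zip_cons_cons, List.filterMap_cons]
      by_cases hxp : x = p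
      · subst hxp
        simp only [ne_eq, Option.some.injEq, not_not]
        rw [if_neg (by simp)]
        rw [ih x]
        simp [cgo]
      · rw [if_pos (by simp [hxp])]
        rw [ih x]
        simp [cgo, hxp]

-- ===== main theorem =====

theorem main_core (r : List (Option String)) (rs : List (List (Option String))) :
    merge_none_cells_py (r :: rs) = merge_none_cells_py_alt (r :: rs) := by
  set rows := r :: rs with hrows
  set n := (rows.map List.length).foldl Nat.max 0 with hn
  have hle : ∀ t ∈ rows, t.length ≤ n :=
    fun t ht => foldl_max_le _ 0 t.length (List.mem_map_of_mem ht)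
  have h0 : ∀ t ∈ rows, (lfA (padA n t)).length = n :=
    fun t ht => lfpad_length n t (hle t ht)
  -- A side: unfold and normalise the up-fill to finalRows
  have hA : merge_none_cells_py rows
      = ((List.range rows.length).map (finalRows rows n)).foldl
          (fun acc row => if acc = [] ∨ acc.getLast? ≠ some row then acc ++ [row] else acc)
          [] := by
    unfold merge_none_cells_py
    rw [if_neg (by simp [hrows])]
    rw [← hn]
    show List.foldl (fun acc row => if acc = [] ∨ acc.getLast? ≠ some row then acc ++ [row] else acc) []
        (List.foldl (fun m c => upColA c m) (List.map lfA (List.map (padA n) rows)) (List.range n))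
      = _
    rw [hrows, List.map_cons, List.map_cons]
    rw [L1 (List.range n) List.nodup_range]
    dsimp only
    rw [List.map_map]
    simp only [Function.comp_def]
    rw [pgo_range n (rs.map (fun t => lfA (padA n t))) (lfA (padA n r))
          (h0 r (by rw [hrows]; exact List.mem_cons_self ..))
          (by intro y hy
              obtain ⟨t, ht, rfl⟩ := List.mem_map.mp hy
              exact h0 t (by rw [hrows]; exact List.mem_cons_of_mem _ ht))]
    have hhead : lfA (padA n r) = finalRows rows n 0 := by
      unfold finalRows
      rw [hrows]
      rfl
    have htail : rgoB (lfA (padA n r)) (rs.map (fun t => lfA (padA n t)))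
        = (List.range' 1 rs.length).map (finalRows rows n) := by
      rw [hhead]
      exact RG rows n rs 0 (by rw [hrows]; rfl)
    rw [htail, hhead]
    have hrange : List.range rows.length = 0 :: List.range' 1 rs.length := by
      rw [hrows]
      simp [List.range_eq_range', List.range'_succ]
    rw [hrange, List.map_cons]
  -- both sides equal collapse of the filled matrix
  have hfill : (List.range rows.length).map (finalRows rows n)
      = (List.range rows.length).map
          (fun i => (List.range n).map (fun c => cellB rows c i)) :=
    List.map_congr_left (fun i _ => finalRows_eq rows n hle i)
  rw [hA, hfill]
  unfold merge_none_cells_py_alt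
  rw [← hn]
  show _ = (List.zip ((none : Option (List (Option String))) ::
      ((List.range rows.length).map (fun i => (List.range n).map (fun c => cellB rows c i))).map some)
      ((List.range rows.length).map (fun i => (List.range n).map (fun c => cellB rows c i)))).filterMap
      (fun p => if some p.2 ≠ p.1 then some p.2 else none)
  have hrange : List.range rows.length = 0 :: List.range' 1 rs.length := by
    rw [hrows]
    simp [List.range_eq_range', List.range'_succ]
  rw [hrange, List.map_cons]
  set f0 := (List.range n).map (fun c => cellB rows c 0) with hf0
  set rest := (List.range' 1 rs.length).map
      (fun i => (List.range n).map (fun c => cellB rows c i)) with hrest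
  -- A-side dedupe fold
  rw [List.foldl_cons, if_pos (Or.inl rfl), List.nil_append]
  rw [dedupA_fold rest [f0] f0 (by simp) (by simp)]
  -- B-side zip dedupe
  simp only [List.map_cons, List.zip_cons_cons, List.filterMap_cons]
  rw [if_pos (by simp)]
  rw [dedupB_zip rest f0]
  rfl

-- ===== VERDICT (by name: the statement is the Claim_ definition above) =====
theorem merge_none_cells_py_spec : Claim_equal_merge_none_cells_py := by
  intro rows _
  unfold Spec_merge_none_cells_py
  cases rows with
  | nil => rfl
  | cons r rs => exact main_core r rs
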